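-- pv_equiv track=rewrite | github.com/TheoHorn/pvcc-grp_2 | jardiquest/controller/suggestion.py | triLoop
-- ===== SOURCE A (Python) =====
-- def triLoop(tab,last): # recursive sorting of batches to maximize diversity
--     liste = tab[:]
--     memoire = []
--     panier = []
--     for i in range(0,len(liste)):
--         if(liste[i][0] not in memoire):
--             memoire.append(liste[i][0])
--             panier.append(liste[i])
--             liste[i]=0
--     liste = [value for value in liste if value != 0]
--
--     if(liste!=[]):
--         return triLoop(liste,last+panier)
--     else :
--         return last+panier
-- ===== SOURCE B (Python) =====
-- def triLoop(tab, last):  # one pass: bucket each item by its occurrence rank of its first key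
--     counts = {}
--     buckets = []
--     for item in tab:
--         k = item[0]
--         r = counts.get(k, 0)
--         counts[k] = r + 1
--         if r == len(buckets):
--             buckets.append([])
--         buckets[r].append(item)
--     out = list(last)
--     for b in buckets:
--         out += b
--     return out
-- ===== Notes on version B (the rewrite author's own statement) =====
-- stated objective: alternative
-- what changed: A makes one recursive pass over the remaining items per round (O(r*n) for r rounds); B makes a single pass, computing each item's occurrence rank of its first key with a dict and appending it to the bucket for that rank, then concatenates the buckets.
import Mathlib
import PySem

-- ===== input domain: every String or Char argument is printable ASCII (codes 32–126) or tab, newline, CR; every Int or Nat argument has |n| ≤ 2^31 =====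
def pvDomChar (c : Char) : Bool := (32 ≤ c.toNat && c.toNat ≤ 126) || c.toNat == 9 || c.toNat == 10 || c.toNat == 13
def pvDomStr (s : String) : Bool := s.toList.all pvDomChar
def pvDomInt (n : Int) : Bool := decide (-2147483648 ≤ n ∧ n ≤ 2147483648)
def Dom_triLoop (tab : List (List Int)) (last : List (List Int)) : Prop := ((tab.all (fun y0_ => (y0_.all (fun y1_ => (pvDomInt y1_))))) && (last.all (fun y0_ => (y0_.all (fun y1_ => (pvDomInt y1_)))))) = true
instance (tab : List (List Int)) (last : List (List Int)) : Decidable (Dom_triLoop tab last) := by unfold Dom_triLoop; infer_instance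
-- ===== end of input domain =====

-- B replaces A's one-recursive-pass-per-round scan by a single pass bucketing each item
-- by the occurrence rank of its first key (objective: alternative algorithm, same result).

-- ===== PORT A =====
-- A's for-loop over liste: memoire collects first keys seen this round, panier the
-- first-occurrence items; items marked 0 and filtered out are exactly the complement,
-- kept in order here as the third accumulator (the filtered 'liste').
def pvSplit (memoire : List Int) (panier reste : List (List Int)) :
    List (List Int) → List Int × List (List Int) × List (List Int)
  | [] => (memoire, panier, reste)
  | x :: xs =>
    if memoire.contains x.headI then pvSplit memoire panier (reste ++ [x]) xs
    else pvSplit (memoire ++ [x.headI]) (panier ++ [x]) reste xs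

-- equation lemmas and termination lemmas for triLoop (the port cites pvSplit_rest_lt in decreasing_by)
theorem pvSplit_nil (m : List Int) (p r : List (List Int)) : pvSplit m p r [] = (m, p, r) := rfl

theorem pvSplit_cons_pos {m : List Int} {x : List Int} (p r : List (List Int)) (xs : List (List Int))
    (h : m.contains x.headI = true) :
    pvSplit m p r (x :: xs) = pvSplit m p (r ++ [x]) xs := by
  have h' : x.headI ∈ m := by simpa using h
  simp [pvSplit, h']

theorem pvSplit_cons_neg {m : List Int} {x : List Int} (p r : List (List Int)) (xs : List (List Int))
    (h : m.contains x.headI = false) :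
    pvSplit m p r (x :: xs) = pvSplit (m ++ [x.headI]) (p ++ [x]) r xs := by
  have h' : x.headI ∉ m := by simpa using h
  simp [pvSplit, h']

theorem pvSplit_len (xs : List (List Int)) : ∀ m p r,
    ((pvSplit m p r xs).2.1).length + ((pvSplit m p r xs).2.2).length
      = p.length + r.length + xs.length := by
  induction xs with
  | nil => intro m p r; simp [pvSplit_nil]
  | cons x xs ih =>
    intro m p r
    by_cases h : m.contains x.headI = true
    · rw [pvSplit_cons_pos p r xs h, ih]; simp; omega
    · rw [pvSplit_cons_neg p r xs (by simpa using h), ih]; simp; omega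

theorem pvSplit_panier_ge (xs : List (List Int)) : ∀ m p r,
    p.length ≤ ((pvSplit m p r xs).2.1).length := by
  induction xs with
  | nil => intro m p r; simp [pvSplit_nil]
  | cons x xs ih =>
    intro m p r
    by_cases h : m.contains x.headI = true
    · rw [pvSplit_cons_pos p r xs h]; exact ih _ _ _
    · rw [pvSplit_cons_neg p r xs (by simpa using h)]
      calc p.length ≤ (p ++ [x]).length := by simp
        _ ≤ _ := ih _ _ _

theorem pvSplit_rest_lt (u : List (List Int)) (h : u ≠ []) :
    ((pvSplit [] [] [] u).2.2).length < u.length := by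
  match u with
  | [] => exact absurd rfl h
  | x :: xs =>
    have hstep : pvSplit [] [] [] (x :: xs) = pvSplit [x.headI] [x] [] xs :=
      pvSplit_cons_neg [] [] xs (by simp)
    rw [hstep]
    have h1 := pvSplit_len xs [x.headI] [x] []
    have h2 := pvSplit_panier_ge xs [x.headI] [x] []
    simp only [List.length_cons, List.length_nil] at h1 h2 ⊢
    omega

def triLoop (tab : List (List Int)) (last : List (List Int)) : List (List Int) :=
  let s := pvSplit [] [] [] tab
  if h : s.2.2 = [] then last ++ s.2.1
  else triLoop s.2.2 (last ++ s.2.1)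
termination_by tab.length
decreasing_by
  have htab : tab ≠ [] := by
    rintro rfl; exact h rfl
  exact pvSplit_rest_lt tab htab

-- ===== PORT B =====
-- buckets[r].append(item): append x at index r (r < length always holds in Source B)
def pvAddAt : List (List (List Int)) → Nat → List Int → List (List (List Int))
  | [], _, _ => []
  | b :: bs, 0, x => (b ++ [x]) :: bs
  | b :: bs, n + 1, x => b :: pvAddAt bs n x

-- the loop body of Source B's single pass
def pvStep (s : PySem.Dict Int Nat × List (List (List Int))) (item : List Int) :
    PySem.Dict Int Nat × List (List (List Int)) :=
  let k := item.headI
  let r := s.1.getD k 0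
  let bs := if r = s.2.length then s.2 ++ [[]] else s.2
  (s.1.insert k (r + 1), pvAddAt bs r item)

def triLoop_alt (tab : List (List Int)) (last : List (List Int)) : List (List Int) :=
  let st := tab.foldl pvStep (PySem.Dict.empty, [])
  st.2.foldl (fun acc b => acc ++ b) last

-- ===== PRECONDITION & SPEC =====
-- Pre_ excludes only inputs on which A raises: liste[i][0] is an IndexError when some
-- element of tab is the empty list (B raises there too).
def Pre_triLoop (tab : List (List Int)) (last : List (List Int)) : Prop :=
  ∀ x ∈ tab, x ≠ []
instance (tab : List (List Int)) (last : List (List Int)) : Decidable (Pre_triLoop tab last) := by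
  unfold Pre_triLoop; infer_instance

def pvWitness_triLoop : List (List Int) × List (List Int) :=
  ([[1, 2], [1, 3], [2, 4], [1, 5]], [[9]])

def Spec_triLoop (tab : List (List Int)) (last : List (List Int)) (out : List (List Int)) : Prop := out = triLoop_alt tab last
instance (tab : List (List Int)) (last : List (List Int)) (out : List (List Int)) : Decidable (Spec_triLoop tab last out) := by unfold Spec_triLoop; infer_instance

-- ===== CLAIM (what is proved, stated in full; the proofs are below) =====
def Claim_equal_triLoop : Prop := ∀ (tab : List (List Int)) (last : List (List Int)), Dom_triLoop tab last → Pre_triLoop tab last → Spec_triLoop tab last (triLoop tab last)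

-- ===== LEMMAS AND PROOFS =====

-- the rounds of A: panier of each recursive pass, in order
def pvRounds (xs : List (List Int)) : List (List (List Int)) :=
  if h : xs = [] then []
  else (pvSplit [] [] [] xs).2.1 :: pvRounds (pvSplit [] [] [] xs).2.2
termination_by xs.length
decreasing_by exact pvSplit_rest_lt xs h

-- occurrence count of key k among the first keys of u
def pvCnt (k : Int) (u : List (List Int)) : Nat :=
  (u.filter (fun y => y.headI == k)).length

-- B's bucket insertion, with the create-new-bucket case folded in
def pvAddAt' (bs : List (List (List Int))) (j : Nat) (x : List Int) : List (List (List Int)) :=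
  if j = bs.length then bs ++ [[x]] else pvAddAt bs j x

theorem pvCnt_append (k : Int) (u v : List (List Int)) :
    pvCnt k (u ++ v) = pvCnt k u + pvCnt k v := by
  simp [pvCnt, List.filter_append]

theorem pvCnt_singleton (k : Int) (x : List Int) :
    pvCnt k [x] = if x.headI = k then 1 else 0 := by
  by_cases h : x.headI = k
  · simp [pvCnt, h]
  · have hb : (x.headI == k) = false := beq_eq_false_iff_ne.mpr h
    simp [pvCnt, hb, h]

-- S1: splitting a snoc
theorem pvSplit_snoc (xs : List (List Int)) : ∀ m p r (x : List Int),
    pvSplit m p r (xs ++ [x]) =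
      (let s := pvSplit m p r xs
       if s.1.contains x.headI then (s.1, s.2.1, s.2.2 ++ [x])
       else (s.1 ++ [x.headI], s.2.1 ++ [x], s.2.2)) := by
  induction xs with
  | nil =>
    intro m p r x
    by_cases h : m.contains x.headI = true
    · have h' : x.headI ∈ m := by simpa using h
      rw [List.nil_append, pvSplit_cons_pos p r [] h, pvSplit_nil, pvSplit_nil]
      simp [h']
    · have h' : x.headI ∉ m := by simpa using h
      rw [List.nil_append, pvSplit_cons_neg p r [] (by simpa using h), pvSplit_nil, pvSplit_nil]
      simp [h']
  | cons y ys ih =>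
    intro m p r x
    by_cases h : m.contains y.headI = true
    · rw [List.cons_append, pvSplit_cons_pos p r (ys ++ [x]) h, pvSplit_cons_pos p r ys h]
      exact ih _ _ _ _
    · rw [List.cons_append, pvSplit_cons_neg p r (ys ++ [x]) (by simpa using h),
        pvSplit_cons_neg p r ys (by simpa using h)]
      exact ih _ _ _ _

-- S2: memoire after the pass = m plus the keys of xs
theorem pvSplit_mem (xs : List (List Int)) : ∀ m p r (k : Int),
    ((pvSplit m p r xs).1.contains k = true) ↔ (m.contains k = true ∨ ∃ y ∈ xs, y.headI = k) := by
  induction xs with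
  | nil => intro m p r k; simp [pvSplit_nil]
  | cons y ys ih =>
    intro m p r k
    by_cases h : m.contains y.headI = true
    · rw [pvSplit_cons_pos p r ys h, ih]
      constructor
      · rintro (hm | hy)
        · exact Or.inl hm
        · exact Or.inr (by obtain ⟨z, hz, hzk⟩ := hy; exact ⟨z, by simp [hz], hzk⟩)
      · rintro (hm | ⟨z, hz, hzk⟩)
        · exact Or.inl hm
        · rcases List.mem_cons.mp hz with rfl | hz'
          · subst hzk; exact Or.inl h
          · exact Or.inr ⟨z, hz', hzk⟩
    · rw [pvSplit_cons_neg p r ys (by simpa using h), ih]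
      constructor
      · rintro (hm | hy)
        · simp only [List.contains_append, Bool.or_eq_true] at hm
          rcases hm with hm' | hm'
          · exact Or.inl hm'
          · have : k = y.headI := by simpa [eq_comm] using hm'
            subst this; exact Or.inr ⟨y, by simp, rfl⟩
        · exact Or.inr (by obtain ⟨z, hz, hzk⟩ := hy; exact ⟨z, by simp [hz], hzk⟩)
      · rintro (hm | ⟨z, hz, hzk⟩)
        · simp only [List.contains_append, Bool.or_eq_true]; exact Or.inl (Or.inl hm)
        · rcases List.mem_cons.mp hz with rfl | hz'
          · exact Or.inl (by simp [hzk])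
          · exact Or.inr ⟨z, hz', hzk⟩

-- S3: count of key k in the rest list
theorem pvSplit_cnt (xs : List (List Int)) : ∀ m p r (k : Int),
    pvCnt k (pvSplit m p r xs).2.2 =
      pvCnt k r + (if m.contains k then pvCnt k xs else pvCnt k xs - 1) := by
  induction xs with
  | nil =>
    intro m p r k
    rw [pvSplit_nil]
    have : pvCnt k ([] : List (List Int)) = 0 := rfl
    split_ifs <;> simp [this]
  | cons y ys ih =>
    intro m p r k
    have hcons : pvCnt k (y :: ys) = (if y.headI = k then 1 else 0) + pvCnt k ys := by
      simp only [pvCnt, List.filter_cons]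
      by_cases h : y.headI = k
      · simp [h]; omega
      · have hb : (y.headI == k) = false := beq_eq_false_iff_ne.mpr h
        simp [hb, h]
    by_cases h : m.contains y.headI = true
    · rw [pvSplit_cons_pos p r ys h, ih, pvCnt_append, pvCnt_singleton, hcons]
      by_cases hk : y.headI = k
      · subst hk
        simp only [h, if_true]
        omega
      · simp [hk]
    · rw [pvSplit_cons_neg p r ys (by simpa using h), ih, hcons]
      by_cases hk : y.headI = k
      · subst hk
        have h1 : y.headI ∈ m ++ [y.headI] := by simp
        have h2 : y.headI ∉ m := by simpa using h
        simp [h1, h2]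
      · have hne : (m ++ [y.headI]).contains k = m.contains k := by
          simp [Ne.symm hk]
        rw [hne]
        simp [hk]

theorem pvCnt_zero_iff (k : Int) (u : List (List Int)) :
    pvCnt k u = 0 ↔ ¬ ∃ y ∈ u, y.headI = k := by
  simp [pvCnt, List.filter_eq_nil_iff]

-- L2: appending one item to the input adds it at bucket index = its occurrence rank
theorem pvRounds_snoc : ∀ n (u : List (List Int)), u.length ≤ n → ∀ (x : List Int),
    pvRounds (u ++ [x]) = pvAddAt' (pvRounds u) (pvCnt x.headI u) x := by
  intro n
  induction n with
  | zero =>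
    intro u hu x
    have : u = [] := List.length_eq_zero_iff.mp (Nat.le_zero.mp hu)
    subst this
    rw [pvRounds, pvRounds]
    simp [pvSplit, pvCnt, pvAddAt', pvRounds]
  | succ n ih =>
    intro u hu x
    by_cases hnil : u = []
    · subst hnil
      rw [pvRounds, pvRounds]
      simp [pvSplit, pvCnt, pvAddAt', pvRounds]
    · set k := x.headI with hk
      obtain ⟨m, p, r, hs⟩ : ∃ m p r, pvSplit [] [] [] u = (m, p, r) :=
        ⟨_, _, _, rfl⟩
      have hrounds_u : pvRounds u = p :: pvRounds r := by
        rw [pvRounds]; simp [hnil, hs]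
      have hsnoc := pvSplit_snoc u [] [] [] x
      rw [hs] at hsnoc
      simp only at hsnoc
      have hrlt : r.length < u.length := by
        have := pvSplit_rest_lt u hnil; rw [hs] at this; exact this
      by_cases hc : pvCnt k u = 0
      · -- k unseen in u: x joins round 0's panier
        have hkm : m.contains k = false := by
          rcases Bool.eq_false_or_eq_true (m.contains k) with h | h
          · exfalso
            have hmm := (pvSplit_mem u [] [] [] k)
            rw [hs] at hmm
            rcases hmm.mp h with h' | h'
            · simp at h'
            · exact (pvCnt_zero_iff k u).mp hc h'
          · exact h
        have hsplit' : pvSplit [] [] [] (u ++ [x]) = (m ++ [x.headI], p ++ [x], r) := by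
          have hkm' : x.headI ∉ m := by rw [hk] at hkm; simpa using hkm
          rw [hsnoc]; simp [hkm']
        have hrounds' : pvRounds (u ++ [x]) = (p ++ [x]) :: pvRounds r := by
          rw [pvRounds]; simp [hsplit']
        rw [hrounds', hrounds_u, hc]
        simp [pvAddAt', pvAddAt]
      · -- k seen in u: x goes to the rest, rank drops by one there
        have hex : ∃ y ∈ u, y.headI = k := by
          by_contra hno; exact hc ((pvCnt_zero_iff k u).mpr hno)
        have hkm : m.contains k = true := by
          have := (pvSplit_mem u [] [] [] k)
          rw [hs] at this
          exact this.mpr (Or.inr hex)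
        have hsplit' : pvSplit [] [] [] (u ++ [x]) = (m, p, r ++ [x]) := by
          have hkm' : x.headI ∈ m := by rw [hk] at hkm; simpa using hkm
          rw [hsnoc]; simp [hkm']
        have hrounds' : pvRounds (u ++ [x]) = p :: pvRounds (r ++ [x]) := by
          rw [pvRounds]; simp [hsplit']
        have hcr : pvCnt k r = pvCnt k u - 1 := by
          have := pvSplit_cnt u [] [] [] k
          rw [hs] at this
          simp [pvCnt] at this
          simpa [pvCnt] using this
        have ihr := ih r (by omega) x
        rw [← hk] at ihr
        rw [hrounds', ihr, hcr, hrounds_u]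
        have hc1 : 1 ≤ pvCnt k u := Nat.one_le_iff_ne_zero.mpr hc
        by_cases hlen : pvCnt k u = (p :: pvRounds r).length
        · have hlen' : pvCnt k u - 1 = (pvRounds r).length := by simp at hlen; omega
          simp [pvAddAt', hlen, hlen']
        · obtain ⟨c, hcc⟩ : ∃ c, pvCnt k u = c + 1 := ⟨pvCnt k u - 1, by omega⟩
          have hlr : c ≠ (pvRounds r).length := by
            intro hcl; apply hlen; simp [hcc, hcl]
          rw [hcc]
          simp only [pvAddAt']
          have hA : ¬ (c + 1 = (p :: pvRounds r).length) := by simpa using hlr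
          have hB : ¬ (c + 1 - 1 = (pvRounds r).length) := by simpa using hlr
          rw [if_neg hA, if_neg hB]
          simp [pvAddAt]

-- C1: the dict in B's fold counts occurrences of each key
theorem pvFold_counts (u : List (List Int)) (k : Int) :
    ((u.foldl pvStep (PySem.Dict.empty, [])).1).getD k 0 = pvCnt k u := by
  induction u using List.reverseRecOn with
  | nil => simp [pvCnt, PySem.Dict.getD_empty]
  | append_singleton u x ih =>
    rw [List.foldl_append]
    simp only [List.foldl, pvStep]
    rw [PySem.Dict.getD_insert, pvCnt_append, pvCnt_singleton, ih]
    by_cases hk : k = x.headI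
    · subst hk; simp [ih]
    · have hxk : ¬ x.headI = k := fun h => hk h.symm
      simp [hk, hxk]

-- one pvStep updates the buckets exactly like pvAddAt' at the item's rank
theorem pvStep_buckets (s : PySem.Dict Int Nat × List (List (List Int))) (x : List Int) :
    (pvStep s x).2 = pvAddAt' s.2 (s.1.getD x.headI 0) x := by
  simp only [pvStep, pvAddAt']
  by_cases h : s.1.getD x.headI 0 = s.2.length
  · rw [if_pos h, if_pos h, h]
    induction s.2 with
    | nil => simp [pvAddAt]
    | cons b bs ih => simpa [pvAddAt] using ih
  · rw [if_neg h, if_neg h]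

-- T3: B's buckets are exactly A's rounds
theorem pvBuckets_eq_rounds (u : List (List Int)) :
    (u.foldl pvStep (PySem.Dict.empty, [])).2 = pvRounds u := by
  induction u using List.reverseRecOn with
  | nil => rw [pvRounds]; simp
  | append_singleton u x ih =>
    rw [List.foldl_append]
    simp only [List.foldl]
    rw [pvStep_buckets, pvFold_counts, ih, pvRounds_snoc u.length u le_rfl x]

-- the final accumulation loop of Source B is append-of-flatten
theorem pvFoldl_append (bs : List (List (List Int))) : ∀ acc,
    bs.foldl (fun a b => a ++ b) acc = acc ++ bs.flatten := by
  induction bs with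
  | nil => simp
  | cons b bs ih => intro acc; simp [List.foldl, ih, List.append_assoc]

-- T1: A returns last ++ flatten of its rounds
theorem triLoop_eq_rounds : ∀ n (tab : List (List Int)), tab.length ≤ n → ∀ last,
    triLoop tab last = last ++ (pvRounds tab).flatten := by
  intro n
  induction n with
  | zero =>
    intro tab h last
    have : tab = [] := List.length_eq_zero_iff.mp (Nat.le_zero.mp h)
    subst this
    rw [triLoop, pvRounds]; simp [pvSplit]
  | succ n ih =>
    intro tab h last
    obtain ⟨m, p, r, hs⟩ : ∃ m p r, pvSplit [] [] [] tab = (m, p, r) := ⟨_, _, _, rfl⟩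
    by_cases hnil : tab = []
    · subst hnil
      rw [triLoop, pvRounds]; simp [pvSplit]
    · have hrounds : pvRounds tab = p :: pvRounds r := by
        rw [pvRounds]; simp [hnil, hs]
      have hrlt : r.length < tab.length := by
        have := pvSplit_rest_lt tab hnil; rw [hs] at this; exact this
      rw [triLoop]
      simp only [hs]
      by_cases hr : r = []
      · subst hr
        rw [dif_pos rfl, hrounds, pvRounds]
        simp
      · rw [dif_neg hr, ih r (by omega) (last ++ p), hrounds]
        simp

-- ===== VERDICT (by name: the statement is the Claim_ definition above) =====
theorem triLoop_spec : Claim_equal_triLoop := by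
  intro tab last _ _
  show triLoop tab last =
    (List.foldl pvStep (PySem.Dict.empty, []) tab).2.foldl (fun acc b => acc ++ b) last
  rw [pvBuckets_eq_rounds, pvFoldl_append,
    triLoop_eq_rounds tab.length tab le_rfl last]
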